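-- pv_equiv track=rewrite | github.com/nexi-lab/nexus | tests/benchmarks/test_prefix_performance.py | _python_batch_prefix_check
-- ===== SOURCE A (Python) =====
-- def _python_batch_prefix_check(paths: list[str], prefixes: list[str]) -> list[bool]:
--     """Pure Python implementation (same as enforcer fallback)."""
--     results = []
--     for prefix in prefixes:
--         prefix_normalized = prefix.rstrip("/") + "/"
--         prefix_exact = prefix.rstrip("/")
--         found = any(p.startswith(prefix_normalized) or p == prefix_exact for p in paths)
--         results.append(found)
--     return results
-- ===== SOURCE B (Python) =====
-- def _python_batch_prefix_check(paths: list[str], prefixes: list[str]) -> list[bool]: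
--     # Index once: a path p matches prefix e iff p == e or p starts with e + "/",
--     # i.e. iff e is p itself or a slice of p that ends right before a "/".
--     hits = set(paths)
--     for p in paths:
--         hits.update(p[:i] for i, ch in enumerate(p) if ch == "/")
--     return [prefix.rstrip("/") in hits for prefix in prefixes]
-- ===== Notes on version B (the rewrite author's own statement) =====
-- stated objective: faster
-- what changed: Instead of scanning all paths for every prefix, B builds one hash set of all paths plus every slash-terminated slice of each path, turning each prefix query into a single set lookup.
import Mathlib
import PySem

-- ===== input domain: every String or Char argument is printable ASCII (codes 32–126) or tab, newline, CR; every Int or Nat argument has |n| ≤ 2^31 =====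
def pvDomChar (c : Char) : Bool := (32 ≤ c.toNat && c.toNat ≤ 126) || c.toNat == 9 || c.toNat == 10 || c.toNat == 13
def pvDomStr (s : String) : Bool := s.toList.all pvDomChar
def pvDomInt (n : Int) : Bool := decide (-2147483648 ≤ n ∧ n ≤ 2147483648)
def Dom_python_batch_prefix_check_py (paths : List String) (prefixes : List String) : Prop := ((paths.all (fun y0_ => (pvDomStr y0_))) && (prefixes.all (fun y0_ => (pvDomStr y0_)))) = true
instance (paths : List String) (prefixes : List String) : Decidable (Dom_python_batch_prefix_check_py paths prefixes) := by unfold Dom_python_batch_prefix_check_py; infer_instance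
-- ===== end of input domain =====

-- B replaces A's per-prefix scan of all paths by one hash set of all paths and of every
-- slash-terminated slice of each path, so each prefix becomes a single set lookup (faster).

-- s.rstrip("/"): drop all trailing '/' characters (hand port, exact: ASCII-independent char-for-char)
def rstripSlash (s : String) : String := String.ofList ((s.toList.reverse.dropWhile (· == '/')).reverse)

-- ===== PORT A =====
def python_batch_prefix_check_py (paths : List String) (prefixes : List String) : List Bool :=
  prefixes.foldl (fun results pre =>
    let prefix_normalized := rstripSlash pre ++ "/"
    let prefix_exact := rstripSlash pre
    let found := paths.any (fun p => PySem.Str.startswith p prefix_normalized || p == prefix_exact)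
    results ++ [found]) []

-- ===== PORT B =====
-- [p[:i] for i, ch in enumerate(p) if ch == "/"]
def pvCutsOf (p : String) : List String :=
  (PySem.List.enumerate p.toList 0).foldl
    (fun acc ic => if ic.2 == '/' then acc ++ [PySem.Str.slice p none (some ic.1)] else acc) []

def python_batch_prefix_check_py_alt (paths : List String) (prefixes : List String) : List Bool :=
  let hits := paths.foldl (fun s p => PySem.Set.update s (pvCutsOf p)) (PySem.Set.ofList paths)
  prefixes.map (fun pre => PySem.Set.contains hits (rstripSlash pre))

-- ===== PRECONDITION & SPEC =====
def Spec_python_batch_prefix_check_py (paths : List String) (prefixes : List String) (out : List Bool) : Prop := out = python_batch_prefix_check_py_alt paths prefixes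
instance (paths : List String) (prefixes : List String) (out : List Bool) : Decidable (Spec_python_batch_prefix_check_py paths prefixes out) := by unfold Spec_python_batch_prefix_check_py; infer_instance

-- ===== CLAIM (what is proved, stated in full; the proofs are below) =====
def Claim_equal_python_batch_prefix_check_py : Prop := ∀ (paths : List String) (prefixes : List String), Dom_python_batch_prefix_check_py paths prefixes → Spec_python_batch_prefix_check_py paths prefixes (python_batch_prefix_check_py paths prefixes)

-- ===== LEMMAS AND PROOFS =====

-- membership in the cut list of one path = "e + '/' is a prefix of p"
theorem mem_pvCutsOf {e p : String} : e ∈ pvCutsOf p ↔ e.toList ++ ['/'] <+: p.toList := by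
  unfold pvCutsOf
  have h := PySem.List.foldl_append_if (fun (ic : Int × Char) => ic.2 == '/')
      (fun ic => PySem.Str.slice p none (some ic.1)) (PySem.List.enumerate p.toList 0) []
  rw [h]
  simp only [List.nil_append, List.mem_map, List.mem_filter, PySem.List.mem_enumerate_iff]
  constructor
  · rintro ⟨⟨i, c⟩, ⟨⟨k, hk, hkc⟩, hc⟩, rfl⟩
    cases hkc
    simp only [beq_iff_eq] at hc
    have hs : (PySem.Str.slice p none (some ((0:Int) + (k:Int)))).toList = p.toList.take k := by
      rw [PySem.Str.toList_slice]
      simp [PySem.List.slice_to_natCast]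
    rw [hs]
    refine ⟨p.toList.drop (k+1), ?_⟩
    rw [List.append_assoc, List.singleton_append, ← hc, ← List.drop_eq_getElem_cons hk,
      List.take_append_drop]
  · rintro ⟨t, ht⟩
    have ht' : e.toList ++ '/' :: t = p.toList := by rw [← ht]; simp
    have hk : e.toList.length < p.toList.length := by
      rw [← ht']; simp only [List.length_append, List.length_cons]; omega
    have hget : p.toList[e.toList.length]'hk = '/' := by
      rw [List.getElem_of_eq ht'.symm, List.getElem_append_right (le_refl _)]
      simp
    refine ⟨(0 + (e.toList.length : Int), '/'), ⟨⟨e.toList.length, hk, by rw [hget]⟩, by simp⟩, ?_⟩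
    apply String.toList_injective
    rw [PySem.Str.toList_slice]
    simp [PySem.List.slice_to_natCast]
    rw [← ht', List.take_left']
    rfl

-- membership in the folded hits set
theorem mem_hits (l : List String) (s : List String) (e : String) :
    e ∈ l.foldl (fun s p => PySem.Set.update s (pvCutsOf p)) s ↔
      e ∈ s ∨ ∃ p ∈ l, e ∈ pvCutsOf p := by
  induction l generalizing s with
  | nil => simp
  | cons a t ih => simp [ih, PySem.Set.mem_update]; tauto

-- ===== VERDICT (by name: the statement is the Claim_ definition above) =====
theorem python_batch_prefix_check_py_spec : Claim_equal_python_batch_prefix_check_py := by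
  intro paths prefixes _
  unfold Spec_python_batch_prefix_check_py python_batch_prefix_check_py python_batch_prefix_check_py_alt
  have h := PySem.List.foldl_append_singleton_eq_map
      (fun pre => paths.any (fun p =>
        PySem.Str.startswith p (rstripSlash pre ++ "/") || p == rstripSlash pre)) prefixes []
  simp only [] at h ⊢
  rw [h, List.nil_append]
  apply List.map_congr_left
  intro pre _
  rw [Bool.eq_iff_iff]
  rw [List.any_eq_true]
  have hc : PySem.Set.contains
      (paths.foldl (fun s p => PySem.Set.update s (pvCutsOf p)) (PySem.Set.ofList paths))
      (rstripSlash pre) = true ↔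
      rstripSlash pre ∈ paths.foldl (fun s p => PySem.Set.update s (pvCutsOf p)) (PySem.Set.ofList paths) := by
    simp [PySem.Set.contains]
  rw [hc, mem_hits, PySem.Set.mem_ofList]
  have hpre : ∀ p : String,
      (PySem.Str.startswith p (rstripSlash pre ++ "/") || p == rstripSlash pre) = true ↔
      ((rstripSlash pre).toList ++ ['/'] <+: p.toList ∨ p = rstripSlash pre) := by
    intro p
    simp [PySem.Str.startswith_eq, PySem.Chars.startswith_iff]
  constructor
  · rintro ⟨p, hp, hval⟩
    rcases (hpre p).mp hval with h1 | h1
    · exact Or.inr ⟨p, hp, mem_pvCutsOf.mpr h1⟩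
    · exact Or.inl (h1 ▸ hp)
  · rintro (h1 | ⟨p, hp, h1⟩)
    · exact ⟨rstripSlash pre, h1, (hpre _).mpr (Or.inr rfl)⟩
    · exact ⟨p, hp, (hpre p).mpr (Or.inl (mem_pvCutsOf.mp h1))⟩
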